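-- pv_equiv track=rewrite | github.com/scarletkc/vexor | vexor/cli.py | _normalize_flashrank_model_args
-- ===== SOURCE A (Python) =====
-- def _normalize_flashrank_model_args(args: list[str]) -> list[str]:
--     normalized: list[str] = []
--     idx = 0
--     while idx < len(args):
--         arg = args[idx]
--         normalized.append(arg)
--         if arg == "--":
--             normalized.extend(args[idx + 1 :])
--             break
--         if arg == "--set-flashrank-model":
--             next_arg = args[idx + 1] if idx + 1 < len(args) else None
--             if next_arg is None or next_arg.startswith("-"):
--                 normalized.append("")
--         idx += 1
--     return normalized
-- ===== SOURCE B (Python) =====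
-- def _normalize_flashrank_model_args(args: list[str]) -> list[str]:
--     try:
--         dd = args.index("--")
--     except ValueError:
--         dd = len(args)
--     head = args[:dd]
--     out: list[str] = []
--     for i, arg in enumerate(head):
--         out.append(arg)
--         if arg == "--set-flashrank-model":
--             nxt = head[i + 1] if i + 1 < len(head) else None
--             if nxt is None or nxt.startswith("-"):
--                 out.append("")
--     out.extend(args[dd:])
--     return out
-- ===== Notes on version B (the rewrite author's own statement) =====
-- stated objective: alternative
-- what changed: B locates the first '--' sentinel up front with args.index (try/except defaulting to len), normalizes only the head segment in an indexed pass with in-head lookahead, then appends the tail verbatim, instead of A's single while-loop that appends-and-breaks at '--'.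
import Mathlib
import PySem

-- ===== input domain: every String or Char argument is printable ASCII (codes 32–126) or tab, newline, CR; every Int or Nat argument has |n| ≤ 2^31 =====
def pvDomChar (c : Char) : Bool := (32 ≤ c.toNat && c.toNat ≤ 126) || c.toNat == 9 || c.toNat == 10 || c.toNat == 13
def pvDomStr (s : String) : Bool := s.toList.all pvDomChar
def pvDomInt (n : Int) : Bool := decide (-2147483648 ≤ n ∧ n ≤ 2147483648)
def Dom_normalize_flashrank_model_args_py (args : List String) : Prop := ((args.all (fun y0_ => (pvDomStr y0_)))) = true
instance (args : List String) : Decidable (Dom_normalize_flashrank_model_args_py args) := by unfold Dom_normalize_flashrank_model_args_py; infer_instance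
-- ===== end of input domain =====

-- B locates the first "--" sentinel once (args.index guarded by try/except), builds the
-- normalized head segment with an indexed lookahead pass, and appends the tail verbatim;
-- objective: alternative decomposition (locate-then-two-segments instead of one loop with break).

-- ===== PORT A =====
-- while-loop of A as structural recursion over the remaining suffix, accumulator = `normalized`
def pvLoopA : List String → List String → List String
  | [], normalized => normalized
  | arg :: tl, normalized =>
    let normalized := normalized ++ [arg]
    if arg = "--" then normalized ++ tl
    else
      let normalized :=
        if arg = "--set-flashrank-model" then
          -- next_arg is None (idx+1 out of range) or next_arg.startswith("-")
          if (match tl.head? with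
              | none => true
              | some n => PySem.Str.startswith n "-") then normalized ++ [""] else normalized
        else normalized
      pvLoopA tl normalized

def normalize_flashrank_model_args_py (args : List String) : List String :=
  pvLoopA args []

-- ===== PORT B =====
-- indexed pass over the head segment, lookahead within the head
def pvProcHead : List String → List String
  | [] => []
  | arg :: tl =>
    arg ::
      (if arg = "--set-flashrank-model" then
        if (match tl.head? with
            | none => true
            | some n => PySem.Str.startswith n "-") then "" :: pvProcHead tl else pvProcHead tl
       else pvProcHead tl)

def normalize_flashrank_model_args_py_alt (args : List String) : List String :=
  let dd := (PySem.List.index? args "--").getD args.length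
  pvProcHead (args.take dd) ++ args.drop dd

-- ===== PRECONDITION & SPEC =====
def Spec_normalize_flashrank_model_args_py (args : List String) (out : List String) : Prop := out = normalize_flashrank_model_args_py_alt args
instance (args : List String) (out : List String) : Decidable (Spec_normalize_flashrank_model_args_py args out) := by unfold Spec_normalize_flashrank_model_args_py; infer_instance

-- ===== CLAIM (what is proved, stated in full; the proofs are below) =====
def Claim_equal_normalize_flashrank_model_args_py : Prop := ∀ (args : List String), Dom_normalize_flashrank_model_args_py args → Spec_normalize_flashrank_model_args_py args (normalize_flashrank_model_args_py args)

-- ===== LEMMAS AND PROOFS =====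

-- A's accumulator factors out
lemma pvLoopA_acc (rest : List String) : ∀ acc : List String, pvLoopA rest acc = acc ++ pvLoopA rest [] := by
  induction rest with
  | nil => intro acc; simp [pvLoopA]
  | cons a tl ih =>
    intro acc
    simp only [pvLoopA]
    split_ifs with h1 h2 h3
    · simp
    · conv_lhs => rw [ih]
      conv_rhs => rw [ih]
      simp
    · conv_lhs => rw [ih]
      conv_rhs => rw [ih]
      simp
    · conv_lhs => rw [ih]
      conv_rhs => rw [ih]
      simp

-- the lookahead condition is the same whether read from the full tail or from the head segment
lemma pvHeadCond (tl : List String) :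
    (match tl.head? with
     | none => true
     | some n => PySem.Str.startswith n "-")
    = (match (tl.take ((PySem.List.index? tl "--").getD tl.length)).head? with
       | none => true
       | some n => PySem.Str.startswith n "-") := by
  cases tl with
  | nil => simp
  | cons b tl' =>
    by_cases hb : b = "--"
    · subst hb
      rw [PySem.List.index?_cons_self]
      simp [PySem.Str.startswith]
      decide
    · rw [PySem.List.index?_cons_of_ne tl' hb]
      cases h : PySem.List.index? tl' "--" <;> simp [List.take_succ_cons]

-- main equation, by induction on args
lemma pvMain : ∀ args : List String, pvLoopA args [] = normalize_flashrank_model_args_py_alt args := by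
  intro args
  induction args with
  | nil => rfl
  | cons a tl ih =>
    by_cases ha : a = "--"
    · subst ha
      unfold normalize_flashrank_model_args_py_alt
      rw [PySem.List.index?_cons_self]
      simp [pvLoopA, pvProcHead]
    · have hdd : ((PySem.List.index? (a :: tl) "--").getD (a :: tl).length)
          = ((PySem.List.index? tl "--").getD tl.length) + 1 := by
        rw [PySem.List.index?_cons_of_ne tl ha]
        cases h : PySem.List.index? tl "--" <;> simp
      simp only [normalize_flashrank_model_args_py_alt, hdd, List.take_succ_cons, List.drop_succ_cons]
      simp only [normalize_flashrank_model_args_py_alt] at ih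
      simp only [pvLoopA, pvProcHead, if_neg ha]
      rw [← pvHeadCond tl]
      split_ifs with h1 h2 <;> (rw [pvLoopA_acc tl, ih]; simp)

-- ===== VERDICT (by name: the statement is the Claim_ definition above) =====
theorem normalize_flashrank_model_args_py_spec : Claim_equal_normalize_flashrank_model_args_py := by
  intro args _
  unfold Spec_normalize_flashrank_model_args_py normalize_flashrank_model_args_py
  exact pvMain args
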